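-- pv_equiv track=rewrite | github.com/Taoooo9/BiLSTM-CRF-pytorch | Models/Crf.py | make_s_row
-- ===== SOURCE A (Python) =====
-- def make_s_row(batch_size, label_num):
--     mask = []
--     unit = []
--     for i in range(batch_size * label_num):
--         unit.append(i)
--         if len(unit) == label_num:
--             for j in range(label_num):
--                 mask.extend(unit)
--             unit = []
--     return mask
-- ===== SOURCE B (Python) =====
-- def make_s_row(batch_size, label_num):
--     # closed-form single pass: element p of the output is (p // label_num**2) * label_num + p % label_num
--     if label_num <= 0:
--         return []
--     n2 = label_num * label_num
--     return [(p // n2) * label_num + p % label_num for p in range(batch_size * n2)]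
-- ===== Notes on version B (the rewrite author's own statement) =====
-- stated objective: simpler
-- what changed: Replaced the flat loop with a unit buffer and a len(unit)==label_num boundary check by a single comprehension that computes each output element in closed form from its position.
import Mathlib
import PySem

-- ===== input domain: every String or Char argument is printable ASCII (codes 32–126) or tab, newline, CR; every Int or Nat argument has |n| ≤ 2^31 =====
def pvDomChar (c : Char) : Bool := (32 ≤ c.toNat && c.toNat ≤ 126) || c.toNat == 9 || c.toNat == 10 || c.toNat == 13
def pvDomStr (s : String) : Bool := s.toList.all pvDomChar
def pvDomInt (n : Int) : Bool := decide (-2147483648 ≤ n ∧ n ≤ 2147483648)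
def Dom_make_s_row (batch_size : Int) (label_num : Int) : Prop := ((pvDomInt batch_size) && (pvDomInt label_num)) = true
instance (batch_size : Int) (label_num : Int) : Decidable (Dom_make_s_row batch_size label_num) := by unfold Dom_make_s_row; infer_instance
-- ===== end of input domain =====

-- B replaces A's buffer-and-boundary-check loop by a closed-form comprehension over positions (simpler, same cost).

-- ===== PORT A =====
-- one loop step of A: append i to unit; when unit is full, extend mask label_num times and reset unit
def msrStep (label_num : Int) (s : List Int × List Int) (i : Int) : List Int × List Int :=
  let unit := s.2 ++ [i]
  if (unit.length : Int) = label_num then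
    ((PySem.List.pyRange 0 label_num 1).foldl (fun m _ => m ++ unit) s.1, [])
  else (s.1, unit)

def make_s_row (batch_size : Int) (label_num : Int) : List Int :=
  ((PySem.List.pyRange 0 (batch_size * label_num) 1).foldl (msrStep label_num) ([], [])).1

-- ===== PORT B =====
def make_s_row_alt (batch_size : Int) (label_num : Int) : List Int :=
  if label_num ≤ 0 then []
  else  -- n2 = label_num * label_num inlined
    (PySem.List.pyRange 0 (batch_size * (label_num * label_num)) 1).map
      (fun p => PySem.Int.floordiv p (label_num * label_num) * label_num + PySem.Int.mod p label_num)

-- ===== PRECONDITION & SPEC =====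
def Spec_make_s_row (batch_size : Int) (label_num : Int) (out : List Int) : Prop := out = make_s_row_alt batch_size label_num
instance (batch_size : Int) (label_num : Int) (out : List Int) : Decidable (Spec_make_s_row batch_size label_num out) := by unfold Spec_make_s_row; infer_instance

-- ===== CLAIM (what is proved, stated in full; the proofs are below) =====
def Claim_equal_make_s_row : Prop := ∀ (batch_size : Int) (label_num : Int), Dom_make_s_row batch_size label_num → Spec_make_s_row batch_size label_num (make_s_row batch_size label_num)

-- ===== LEMMAS AND PROOFS =====

-- when label_num ≤ 0 the boundary check never fires, so the mask stays as it started
theorem msr_fold_nonpos (label_num : Int) (h : label_num ≤ 0) :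
    ∀ (l : List Int) (m u : List Int), (l.foldl (msrStep label_num) (m, u)).1 = m := by
  intro l
  induction l with
  | nil => intro m u; rfl
  | cons x xs ih =>
      intro m u
      have hne : ¬ (((u ++ [x]).length : Int) = label_num) := by
        simp only [List.length_append, List.length_singleton]
        push_cast; omega
      simp only [List.foldl_cons, msrStep, hne, ite_false]
      exact ih m (u ++ [x])

-- the inner 'for j in range(label_num): mask.extend(unit)' loop
theorem foldl_extend (v : List Int) :
    ∀ (l : List Int) (init : List Int),
      l.foldl (fun m (_ : Int) => m ++ v) init = init ++ (List.replicate l.length v).flatten := by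
  intro l
  induction l with
  | nil => intro init; simp
  | cons x xs ih => intro init; simp [ih, List.replicate_succ]

-- the reference shape: b full blocks, each repeated label_num times
def msrRef (label_num : Int) (b : Nat) : List Int :=
  (List.range b).flatMap
    (fun i => (List.replicate label_num.toNat
        (PySem.List.pyRange ((i : Int) * label_num) ((i : Int) * label_num + label_num) 1)).flatten)

theorem msrRef_succ (label_num : Int) (b : Nat) :
    msrRef label_num (b + 1) = msrRef label_num b
      ++ (List.replicate label_num.toNat
          (PySem.List.pyRange ((b : Int) * label_num) ((b : Int) * label_num + label_num) 1)).flatten := by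
  simp [msrRef, List.range_succ]

-- processing the tail of a block: c+1 remaining items, the check fires exactly at the last one
theorem msr_block (label_num : Int) :
    ∀ (c : Nat) (u m : List Int) (s : Int), (u.length : Int) + (c + 1) = label_num →
      (PySem.List.pyRange s (s + (c + 1 : Int)) 1).foldl (msrStep label_num) (m, u)
        = (m ++ (List.replicate label_num.toNat (u ++ PySem.List.pyRange s (s + (c + 1 : Int)) 1)).flatten, []) := by
  intro c
  induction c with
  | zero =>
      intro u m s hu
      simp only [Nat.cast_zero] at hu ⊢
      rw [show s + ((0 : Int) + 1) = s + 1 by ring, PySem.List.pyRange_one_singleton]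
      have hfire : (((u ++ [s]).length : Int) = label_num) := by
        simp only [List.length_append, List.length_singleton]; push_cast at hu ⊢; omega
      simp only [List.foldl_cons, List.foldl_nil, msrStep, hfire, if_pos]
      rw [foldl_extend, PySem.List.length_pyRange_one]
      norm_num
  | succ c ih =>
      intro u m s hu
      simp only [Nat.cast_add, Nat.cast_one] at hu ⊢
      have hlt : s < s + ((c : Int) + 1 + 1) := by omega
      rw [PySem.List.pyRange_one_cons hlt]
      have hne : ¬ (((u ++ [s]).length : Int) = label_num) := by
        simp only [List.length_append, List.length_singleton]; push_cast; omega
      simp only [List.foldl_cons, msrStep, hne, ite_false]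
      have h2 : (s + 1) + ((c : Int) + 1) = s + ((c : Int) + 1 + 1) := by ring
      have := ih (u ++ [s]) m (s + 1)
        (by simp only [List.length_append, List.length_singleton]; push_cast; omega)
      rw [h2] at this
      rw [this]
      simp

-- A's fold over b full blocks produces the reference shape with an empty buffer
theorem msr_A_ref (label_num : Int) (hpos : 0 < label_num) :
    ∀ (b : Nat),
      ((PySem.List.pyRange 0 ((b : Int) * label_num) 1).foldl (msrStep label_num) ([], []))
        = (msrRef label_num b, []) := by
  intro b
  induction b with
  | zero => simp [msrRef, PySem.List.pyRange_one_eq_nil]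
  | succ b ih =>
      have hcast : ((b + 1 : Nat) : Int) * label_num = ((b : Int) + 1) * label_num := by
        push_cast; ring
      have hle1 : (0 : Int) ≤ (b : Int) * label_num := by positivity
      have hle2 : (b : Int) * label_num ≤ ((b : Int) + 1) * label_num := by nlinarith
      rw [hcast, PySem.List.pyRange_one_append 0 ((b : Int) * label_num)
            (((b : Int) + 1) * label_num) hle1 hle2, List.foldl_append, ih]
      obtain ⟨c, hc⟩ : ∃ c : Nat, (c : Int) + 1 = label_num :=
        ⟨(label_num - 1).toNat, by omega⟩
      have hend : ((b : Int) + 1) * label_num = (b : Int) * label_num + ((c : Int) + 1) := by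
        rw [hc]; ring
      rw [hend, msr_block label_num c [] (msrRef label_num b) ((b : Int) * label_num)
            (by simpa using hc), msrRef_succ, hc]
      simp

-- one repeated block of B's comprehension equals one block list
theorem msr_copy (label_num : Int) (hpos : 0 < label_num) (b : Int) (j : Nat)
    (hj : (j : Int) + 1 ≤ label_num) :
    (PySem.List.pyRange (b * (label_num * label_num) + (j : Int) * label_num)
        (b * (label_num * label_num) + (j : Int) * label_num + label_num) 1).map
      (fun p => PySem.Int.floordiv p (label_num * label_num) * label_num + PySem.Int.mod p label_num)
    = PySem.List.pyRange (b * label_num) (b * label_num + label_num) 1 := by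
  rw [PySem.List.pyRange_one, PySem.List.pyRange_one]
  simp only [add_sub_cancel_left, List.map_map]
  apply List.map_congr_left
  intro k hk
  have hk' : (k : Int) < label_num := by
    have := List.mem_range.mp hk
    omega
  have hk0 : (0 : Int) ≤ (k : Int) := by positivity
  have hn2 : (0 : Int) < label_num * label_num := by positivity
  simp only [Function.comp]
  have hdiv : PySem.Int.floordiv (b * (label_num * label_num) + (j : Int) * label_num + (k : Int)) (label_num * label_num) = b := by
    rw [PySem.Int.floordiv_eq_iff_of_pos hn2]
    constructor
    · nlinarith
    · nlinarith
  have hmod : PySem.Int.mod (b * (label_num * label_num) + (j : Int) * label_num + (k : Int)) label_num = (k : Int) := by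
    rw [PySem.Int.mod_eq_emod_of_pos hpos]
    have : b * (label_num * label_num) + (j : Int) * label_num + (k : Int)
        = (k : Int) + label_num * (b * label_num + (j : Int)) := by ring
    rw [this, Int.add_mul_emod_self_left, Int.emod_eq_of_lt hk0 hk']
  rw [hdiv, hmod]

-- the label_num^2 positions of one batch row map to label_num copies of its block
theorem msr_copies (label_num : Int) (hpos : 0 < label_num) (b : Int) :
    ∀ (c j : Nat), (j : Int) + (c : Int) = label_num →
      (PySem.List.pyRange (b * (label_num * label_num) + (j : Int) * label_num)
          (b * (label_num * label_num) + label_num * label_num) 1).map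
        (fun p => PySem.Int.floordiv p (label_num * label_num) * label_num + PySem.Int.mod p label_num)
      = (List.replicate c (PySem.List.pyRange (b * label_num) (b * label_num + label_num) 1)).flatten := by
  intro c
  induction c with
  | zero =>
      intro j hj
      have : b * (label_num * label_num) + (j : Int) * label_num
          = b * (label_num * label_num) + label_num * label_num := by
        push_cast at hj; rw [show (j : Int) = label_num by omega]
      rw [this, PySem.List.pyRange_one_eq_nil (le_refl _)]
      simp
  | succ c ih =>
      intro j hj
      push_cast at hj
      have hj1 : (j : Int) + 1 ≤ label_num := by omega
      have hsplit : PySem.List.pyRange (b * (label_num * label_num) + (j : Int) * label_num)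
            (b * (label_num * label_num) + label_num * label_num) 1
          = PySem.List.pyRange (b * (label_num * label_num) + (j : Int) * label_num)
              (b * (label_num * label_num) + (j : Int) * label_num + label_num) 1
            ++ PySem.List.pyRange (b * (label_num * label_num) + ((j : Int) + 1) * label_num)
              (b * (label_num * label_num) + label_num * label_num) 1 := by
        have h1 : b * (label_num * label_num) + (j : Int) * label_num
            ≤ b * (label_num * label_num) + (j : Int) * label_num + label_num := by omega
        have h2 : b * (label_num * label_num) + (j : Int) * label_num + label_num
            ≤ b * (label_num * label_num) + label_num * label_num := by nlinarith
        have := PySem.List.pyRange_one_append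
          (b * (label_num * label_num) + (j : Int) * label_num)
          (b * (label_num * label_num) + (j : Int) * label_num + label_num)
          (b * (label_num * label_num) + label_num * label_num) h1 h2
        rw [this]
        congr 2
        ring
      rw [hsplit, List.map_append, msr_copy label_num hpos b j hj1]
      have := ih (j + 1) (by push_cast; omega)
      push_cast at this
      rw [this]
      simp [List.replicate_succ]

-- B's comprehension over b rows equals the reference shape
theorem msr_B_ref (label_num : Int) (hpos : 0 < label_num) :
    ∀ (b : Nat),
      (PySem.List.pyRange 0 ((b : Int) * (label_num * label_num)) 1).map
        (fun p => PySem.Int.floordiv p (label_num * label_num) * label_num + PySem.Int.mod p label_num)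
      = msrRef label_num b := by
  intro b
  induction b with
  | zero => simp [msrRef, PySem.List.pyRange_one_eq_nil]
  | succ b ih =>
      have hcast : ((b + 1 : Nat) : Int) * (label_num * label_num)
          = ((b : Int) + 1) * (label_num * label_num) := by push_cast; ring
      have hle1 : (0 : Int) ≤ (b : Int) * (label_num * label_num) := by positivity
      have hle2 : (b : Int) * (label_num * label_num)
          ≤ ((b : Int) + 1) * (label_num * label_num) := by nlinarith
      rw [hcast, PySem.List.pyRange_one_append 0 ((b : Int) * (label_num * label_num))
            (((b : Int) + 1) * (label_num * label_num)) hle1 hle2, List.map_append, ih]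
      have hcopies := msr_copies label_num hpos (b : Int) label_num.toNat 0 (by omega)
      simp only [Nat.cast_zero, zero_mul, add_zero] at hcopies
      have hend : ((b : Int) + 1) * (label_num * label_num)
          = (b : Int) * (label_num * label_num) + label_num * label_num := by ring
      rw [hend, hcopies, msrRef_succ]

-- main equivalence: case split on label_num ≤ 0, batch_size ≤ 0, and the block induction
theorem msr_main (batch_size label_num : Int) :
    make_s_row batch_size label_num = make_s_row_alt batch_size label_num := by
  unfold make_s_row make_s_row_alt
  by_cases hln : label_num ≤ 0
  · rw [if_pos hln]
    exact msr_fold_nonpos label_num hln _ [] []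
  · push Not at hln
    rw [if_neg (by omega)]
    by_cases hb : batch_size ≤ 0
    · have h1 : batch_size * label_num ≤ 0 := by nlinarith
      have h2 : batch_size * (label_num * label_num) ≤ 0 := by nlinarith
      rw [PySem.List.pyRange_one_eq_nil (by omega), PySem.List.pyRange_one_eq_nil (by omega)]
      rfl
    · push Not at hb
      obtain ⟨b, hbeq⟩ : ∃ b : Nat, (b : Int) = batch_size := ⟨batch_size.toNat, by omega⟩
      rw [← hbeq, msr_A_ref label_num hln b, msr_B_ref label_num hln b]

-- ===== VERDICT (by name: the statement is the Claim_ definition above) =====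
theorem make_s_row_spec : Claim_equal_make_s_row := by
  intro batch_size label_num _
  unfold Spec_make_s_row
  exact msr_main batch_size label_num
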